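-- pv_equiv track=rewrite | github.com/ChepelVE/STA-with-Python | Lecture_2_Collections_homework/hw2.py | major_and_minor_elem
-- ===== SOURCE A (Python) =====
-- import math
-- from typing import List, Tuple
--
-- def major_and_minor_elem(inp: List) -> Tuple[int, int]:
--     inp.sort()
--     length = len(inp)
--     min_count = length + 1
--     curr_count = 1
--     for i in range(1, length):
--         if inp[i] == inp[i - 1]:
--             curr_count = curr_count + 1
--         else:
--             if curr_count < min_count:
--                 min_count = curr_count
--                 minor_res = inp[i - 1]
--             curr_count = 1
--     if curr_count < min_count:
--         minor_res = inp[length - 1]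
--     if length % 2 == 0:
--         major_res = inp[length / 2]
--     else:
--         major_res = inp[math.ceil(length / 2)]
--     return major_res, minor_res
-- ===== SOURCE B (Python) =====
-- def major_and_minor_elem(inp):
--     inp.sort()
--     counts = {}
--     for x in inp:
--         counts[x] = counts.get(x, 0) + 1
--     min_freq = min(counts.values())
--     minor_res = min(k for k, v in counts.items() if v == min_freq)
--     major_res = inp[(len(inp) + 1) // 2]
--     return major_res, minor_res
-- ===== Notes on version B (the rewrite author's own statement) =====
-- stated objective: simpler
-- what changed: The running min-count scan over adjacent duplicates in the sorted list is replaced by a frequency dictionary built in one pass, taking the minimum frequency and the smallest key attaining it; the median-side index uses (len+1)//2 instead of math.ceil on a float.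
-- outside the precondition, e.g. on major_and_minor_elem([1]): A raises IndexError, B raises IndexError; on major_and_minor_elem([1, 2]): A raises TypeError, B returns (2, 1)
import Mathlib
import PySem

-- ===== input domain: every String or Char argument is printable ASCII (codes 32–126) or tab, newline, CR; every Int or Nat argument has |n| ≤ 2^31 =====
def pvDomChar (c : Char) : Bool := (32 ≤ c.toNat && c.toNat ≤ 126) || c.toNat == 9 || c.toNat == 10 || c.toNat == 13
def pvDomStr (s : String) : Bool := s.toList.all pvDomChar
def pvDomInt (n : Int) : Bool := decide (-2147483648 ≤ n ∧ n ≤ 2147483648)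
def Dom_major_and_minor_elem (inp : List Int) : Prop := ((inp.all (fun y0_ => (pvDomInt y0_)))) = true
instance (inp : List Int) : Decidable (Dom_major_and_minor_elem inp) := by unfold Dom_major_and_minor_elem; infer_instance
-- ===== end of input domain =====

-- B replaces A's running min-count scan over adjacent duplicates with a frequency
-- dictionary (min frequency, then smallest key attaining it): simpler decomposition.
-- Both Pythons sort `inp` IN PLACE (same observable mutation); equivalence is about the return value.

-- ===== PORT A =====
-- loop body of A's `for i in range(1, length)` (state = (min_count, curr_count, minor_res))
def pvStepA (s : List Int) (st : Int × Int × Int) (i : Int) : Int × Int × Int :=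
  if PySem.List.pyGetD s i 0 = PySem.List.pyGetD s (i - 1) 0 then
    (st.1, st.2.1 + 1, st.2.2)
  else if st.2.1 < st.1 then
    (st.2.1, 1, PySem.List.pyGetD s (i - 1) 0)
  else
    (st.1, 1, st.2.2)

def major_and_minor_elem (inp : List Int) : Int × Int :=
  let s := PySem.List.sorted inp (fun x => x) false        -- inp.sort()
  let length : Int := (s.length : Int)
  let st := (PySem.List.pyRange 1 length 1).foldl (pvStepA s) (length + 1, 1, 0)
  let minor_res : Int :=
    if st.2.1 < st.1 then PySem.List.pyGetD s (length - 1) 0 else st.2.2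
  if PySem.Int.mod length 2 = 0 then
    (0, minor_res)                                          -- Python: inp[length/2] raises TypeError (float index); outside Pre_
  else
    (PySem.List.pyGetD s (-(PySem.Int.floordiv (-length) 2)) 0, minor_res)   -- math.ceil(length/2) = -((-length)//2)

-- ===== PORT B =====
def major_and_minor_elem_alt (inp : List Int) : Int × Int :=
  let s := PySem.List.sorted inp (fun x => x) false        -- inp.sort()
  let counts := s.foldl (fun (d : PySem.Dict Int Int) x => d.insert x (d.getD x 0 + 1)) PySem.Dict.empty
  let min_freq : Int := (PySem.List.min? counts.values (fun v => v)).getD 0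
  let minor_res : Int :=
    (PySem.List.min? ((counts.items.filter (fun p => p.2 == min_freq)).map Prod.fst) (fun k => k)).getD 0
  let major_res : Int :=
    PySem.List.pyGetD s (PySem.Int.floordiv ((s.length : Int) + 1) 2) 0
  (major_res, minor_res)

-- ===== PRECONDITION & SPEC =====
-- A returns normally exactly on odd-length lists of length ≥ 3: on even length the float
-- index inp[length/2] raises TypeError, and on length 1 inp[1] raises IndexError.
def Pre_major_and_minor_elem (inp : List Int) : Prop :=
  3 ≤ inp.length ∧ inp.length % 2 = 1
instance (inp : List Int) : Decidable (Pre_major_and_minor_elem inp) := by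
  unfold Pre_major_and_minor_elem; infer_instance

def pvWitness_major_and_minor_elem : List Int := [5, 5, 7]

def Spec_major_and_minor_elem (inp : List Int) (out : Int × Int) : Prop := out = major_and_minor_elem_alt inp
instance (inp : List Int) (out : Int × Int) : Decidable (Spec_major_and_minor_elem inp out) := by unfold Spec_major_and_minor_elem; infer_instance

-- ===== CLAIM (what is proved, stated in full; the proofs are below) =====
def Claim_equal_major_and_minor_elem : Prop := ∀ (inp : List Int), Dom_major_and_minor_elem inp → Pre_major_and_minor_elem inp → Spec_major_and_minor_elem inp (major_and_minor_elem inp)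


-- ===== LEMMAS AND PROOFS =====

-- A's index loop, rewritten as structural recursion on the tail of the sorted list
def scanRun : Int → (Int × Int × Int) → List Int → Int × Int × Int
  | _, st, [] => st
  | prev, st, x :: xs =>
    if x = prev then scanRun x (st.1, st.2.1 + 1, st.2.2) xs
    else if st.2.1 < st.1 then scanRun x (st.2.1, 1, prev) xs
    else scanRun x (st.1, 1, st.2.2) xs

-- run-length decomposition of a list, starting inside a run of `prev` already counted `cc` times
def runsAux : Int → Int → List Int → List (Int × Int)
  | prev, cc, [] => [(prev, cc)]
  | prev, cc, x :: xs => if x = prev then runsAux prev (cc + 1) xs else (prev, cc) :: runsAux x 1 xs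

-- A's "keep the first strictly smaller run" selection as a fold over runs
def bestRun (st : Int × Int) (rs : List (Int × Int)) : Int × Int :=
  rs.foldl (fun p q => if q.2 < p.1 then (q.2, q.1) else p) st

lemma bestRun_cons (st : Int × Int) (q : Int × Int) (rs : List (Int × Int)) :
    bestRun st (q :: rs) = bestRun (if q.2 < st.1 then (q.2, q.1) else st) rs := by
  simp [bestRun]

lemma foldA_eq_scanRun (s : List Int) :
    ∀ (t : List Int) (a : Int) (st : Int × Int × Int) (prev : Int),
      1 ≤ a → s.drop (a - 1).toNat = prev :: t →
      (PySem.List.pyRange a (s.length : Int) 1).foldl (pvStepA s) st = scanRun prev st t := by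
  intro t
  induction t with
  | nil =>
    intro a st prev ha h
    have hlen := congrArg List.length h
    simp at hlen
    have hEnd : (s.length : Int) ≤ a := by omega
    rw [PySem.List.pyRange_one_eq_nil hEnd]
    simp [scanRun]
  | cons x t' ih =>
    intro a st prev ha h
    have hlen := congrArg List.length h
    simp at hlen
    have hlt : a < (s.length : Int) := by omega
    rw [PySem.List.pyRange_one_cons hlt, List.foldl_cons]
    have hgPrev : PySem.List.pyGetD s (a - 1) 0 = prev := by
      rw [PySem.List.pyGetD_eq_getElem s 0 (by omega) (by omega)]
      have h0 : s[(a - 1).toNat]? = some prev := by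
        rw [← Nat.add_zero (a - 1).toNat, ← List.getElem?_drop, h]; rfl
      exact (List.getElem_eq_iff (by omega)).mpr h0
    have hgX : PySem.List.pyGetD s a 0 = x := by
      rw [PySem.List.pyGetD_eq_getElem s 0 (by omega) (by omega)]
      have h0 : s[a.toNat]? = some x := by
        have : a.toNat = (a - 1).toNat + 1 := by omega
        rw [this, ← List.getElem?_drop, h]; rfl
      exact (List.getElem_eq_iff (by omega)).mpr h0
    have hdrop : s.drop ((a + 1) - 1).toNat = x :: t' := by
      have h2 : ((a + 1) - 1).toNat = (a - 1).toNat + 1 := by omega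
      rw [h2, ← List.tail_drop, h]; rfl
    by_cases hxp : x = prev
    · have hstep : pvStepA s st a = (st.1, st.2.1 + 1, st.2.2) := by
        simp [pvStepA, hgPrev, hgX, hxp]
      rw [hstep, ih (a + 1) _ prev (by omega) (hxp ▸ hdrop)]
      simp [scanRun, hxp]
    · by_cases hcc : st.2.1 < st.1
      · have hstep : pvStepA s st a = (st.2.1, 1, prev) := by
          simp [pvStepA, hgPrev, hgX, hxp, hcc]
        rw [hstep, ih (a + 1) _ x (by omega) hdrop]
        simp [scanRun, hxp, hcc]
      · have hstep : pvStepA s st a = (st.1, 1, st.2.2) := by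
          simp [pvStepA, hgPrev, hgX, hxp, hcc]
        rw [hstep, ih (a + 1) _ x (by omega) hdrop]
        simp [scanRun, hxp, hcc]
  
  


lemma scanRun_best :
    ∀ (t : List Int) (prev mc cc mr last : Int),
      t.getLastD prev = last →
      (if (scanRun prev (mc, cc, mr) t).2.1 < (scanRun prev (mc, cc, mr) t).1 then
        ((scanRun prev (mc, cc, mr) t).2.1, last)
       else ((scanRun prev (mc, cc, mr) t).1, (scanRun prev (mc, cc, mr) t).2.2))
        = bestRun (mc, mr) (runsAux prev cc t) := by
  intro t
  induction t with
  | nil =>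
    intro prev mc cc mr last hlast
    simp at hlast
    subst hlast
    by_cases h : cc < mc <;> simp [scanRun, runsAux, bestRun, h]
  | cons x t' ih =>
    intro prev mc cc mr last hlast
    have hlast' : t'.getLastD x = last := by
      rw [← hlast, List.getLastD_cons]
    by_cases hxp : x = prev
    · subst hxp
      have h1 : scanRun x (mc, cc, mr) (x :: t') = scanRun x (mc, cc + 1, mr) t' := by
        simp [scanRun]
      have h2 : runsAux x cc (x :: t') = runsAux x (cc + 1) t' := by
        simp [runsAux]
      rw [h1, h2]
      exact ih x mc (cc + 1) mr last hlast'
    · have h2 : runsAux prev cc (x :: t') = (prev, cc) :: runsAux x 1 t' := by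
        simp [runsAux, hxp]
      rw [h2, bestRun_cons]
      by_cases hcc : cc < mc
      · have h1 : scanRun prev (mc, cc, mr) (x :: t') = scanRun x (cc, 1, prev) t' := by
          simp [scanRun, hxp, hcc]
        rw [h1, if_pos (show (prev, cc).2 < (mc, mr).1 from hcc)]
        exact ih x cc 1 prev last hlast'
      · have h1 : scanRun prev (mc, cc, mr) (x :: t') = scanRun x (mc, 1, mr) t' := by
          simp [scanRun, hxp, hcc]
        rw [h1, if_neg (show ¬ (prev, cc).2 < (mc, mr).1 from hcc)]
        exact ih x mc 1 mr last hlast'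

lemma foldl_add_fresh :
    ∀ (l : List Int) (s : List Int) (a : Int), a ∉ l →
      List.foldl PySem.Set.add (a :: s) l = a :: List.foldl PySem.Set.add s l := by
  intro l
  induction l with
  | nil => intro s a _; rfl
  | cons x l' ih =>
    intro s a h
    have hax : a ≠ x := by simp at h; exact h.1
    have hxa : x ≠ a := Ne.symm hax
    have hstep : PySem.Set.add (a :: s) x = a :: PySem.Set.add s x := by
      by_cases hc : x ∈ s
      · simp [PySem.Set.add, PySem.Set.contains, hc]
      · simp [PySem.Set.add, PySem.Set.contains, hxa, hc]
    rw [List.foldl_cons, List.foldl_cons, hstep, ih _ a (by simp at h; exact h.2)]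

lemma ofList_cons_fresh (a : Int) (l : List Int) (h : a ∉ l) :
    PySem.Set.ofList (a :: l) = a :: PySem.Set.ofList l := by
  have hadd : PySem.Set.add PySem.Set.empty a = [a] := rfl
  simp only [PySem.Set.ofList, List.foldl_cons, hadd]
  exact foldl_add_fresh l [] a h

lemma ofList_cons_dup (a : Int) (l : List Int) :
    PySem.Set.ofList (a :: a :: l) = PySem.Set.ofList (a :: l) := by
  simp only [PySem.Set.ofList, List.foldl_cons]
  have h2 : PySem.Set.add (PySem.Set.add PySem.Set.empty a) a = PySem.Set.add PySem.Set.empty a := by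
    simp [PySem.Set.add, PySem.Set.empty, PySem.Set.contains]
  rw [h2]

lemma foldl_add_append (l : List Int) :
    ∀ (s : List Int), ∃ e, List.foldl PySem.Set.add s l = s ++ e ∧ e.Sublist l := by
  induction l with
  | nil => intro s; exact ⟨[], by simp⟩
  | cons x l' ih =>
    intro s
    rw [List.foldl_cons]
    by_cases hc : x ∈ s
    · have hadd : PySem.Set.add s x = s := by simp [PySem.Set.add, PySem.Set.contains, hc]
      rw [hadd]
      obtain ⟨e, he, hs⟩ := ih s
      exact ⟨e, he, hs.cons x⟩
    · have hadd : PySem.Set.add s x = s ++ [x] := by simp [PySem.Set.add, PySem.Set.contains, hc]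
      rw [hadd]
      obtain ⟨e, he, hs⟩ := ih (s ++ [x])
      exact ⟨x :: e, by simpa using he, hs.cons₂ x⟩

lemma ofList_sublist (l : List Int) : (PySem.Set.ofList l).Sublist l := by
  obtain ⟨e, he, hs⟩ := foldl_add_append l []
  simpa [PySem.Set.ofList, PySem.Set.empty, he] using hs

lemma runsAux_eq_map :
    ∀ (t : List Int) (prev cc : Int), (prev :: t).Pairwise (· ≤ ·) →
      runsAux prev cc t
        = (PySem.Set.ofList (prev :: t)).map
            (fun k => (k, if k = prev then cc + (t.count prev : Int) else (t.count k : Int))) := by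
  intro t
  induction t with
  | nil =>
    intro prev cc _
    have : PySem.Set.ofList [prev] = [prev] := rfl
    simp [runsAux, this]
  | cons x t' ih =>
    intro prev cc hp
    by_cases hxp : x = prev
    · subst hxp
      have hp' : (x :: t').Pairwise (· ≤ ·) := hp.of_cons
      have h1 : runsAux x cc (x :: t') = runsAux x (cc + 1) t' := by simp [runsAux]
      rw [h1, ih x (cc + 1) hp', ofList_cons_dup]
      apply List.map_congr_left
      intro k _
      by_cases hk : k = x <;> simp [hk, List.count_cons] <;> omega
    · have hple : ∀ y ∈ x :: t', prev ≤ y := fun y hy => (List.pairwise_cons.mp hp).1 y hy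
      have hplt : prev ∉ x :: t' := by
        intro hmem
        rcases List.mem_cons.mp hmem with h | h
        · exact hxp h.symm
        · have hx : prev ≤ x := hple x (by simp)
          have h2 : x ≤ prev := (List.pairwise_cons.mp hp.of_cons).1 prev h
          exact hxp (le_antisymm h2 hx)
      have h1 : runsAux prev cc (x :: t') = (prev, cc) :: runsAux x 1 t' := by
        simp [runsAux, hxp]
      rw [h1, ih x 1 hp.of_cons, ofList_cons_fresh prev (x :: t') hplt]
      simp only [List.map_cons]
      have hcp : (x :: t').count prev = 0 := List.count_eq_zero.mpr hplt
      refine List.cons_eq_cons.mpr ⟨by simp [hcp], ?_⟩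
      apply List.map_congr_left
      intro k hk
      have hkmem : k ∈ x :: t' := (PySem.Set.mem_ofList _ _).mp hk
      have hknp : k ≠ prev := fun h => hplt (h ▸ hkmem)
      by_cases hkx : k = x <;> simp [hkx, hknp, List.count_cons] <;> omega

lemma foldl_min_eq (l : List Int) :
    ∀ a : Int, l.foldl min a =
      match PySem.List.min? l (fun y => y) with
      | none => a
      | some m => min a m := by
  induction l with
  | nil => intro a; rfl
  | cons x l' ih =>
    intro a
    rw [List.foldl_cons, ih (min a x), PySem.List.min?_id_cons, ih x]
    cases h : PySem.List.min? l' (fun y => y) with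
    | none => simp
    | some m => simp [min_assoc]

lemma pymin_cons_char (x : Int) (l : List Int) :
    PySem.List.min? (x :: l) (fun y => y) =
      some (match PySem.List.min? l (fun y => y) with
            | none => x
            | some m => min x m) := by
  rw [PySem.List.min?_id_cons, foldl_min_eq]

lemma bestRun_char :
    ∀ (rs : List (Int × Int)) (mc mr : Int),
      bestRun (mc, mr) rs =
        match PySem.List.min? (rs.map Prod.snd) (fun y => y) with
        | none => (mc, mr)
        | some m =>
          if m < mc then (m, ((rs.filter (fun p => p.2 == m)).map Prod.fst).headD mr)
          else (mc, mr) := by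
  intro rs
  induction rs with
  | nil => intro mc mr; rfl
  | cons q rs' ih =>
    intro mc mr
    rw [bestRun_cons]
    rw [List.map_cons, pymin_cons_char]
    cases h : PySem.List.min? (rs'.map Prod.snd) (fun y => y) with
    | none =>
      have hrs' : rs' = [] := by
        cases rs' with
        | nil => rfl
        | cons p ps => rw [List.map_cons, pymin_cons_char] at h; exact absurd h (by simp)
      subst hrs'
      by_cases hq : q.2 < mc <;> simp [hq, bestRun]
    | some m' =>
      by_cases hq : q.2 < mc
      · rw [if_pos hq, ih q.2 q.1]
        rw [h]
        dsimp only
        by_cases hm' : m' < q.2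
        · have hmin : min q.2 m' = m' := by omega
          rw [hmin, if_pos (by omega : m' < mc), if_pos hm']
          have hfq : (q.2 == m') = false := by simp; omega
          rw [show List.filter (fun p => p.2 == m') (q :: rs') = List.filter (fun p => p.2 == m') rs' from by
            simp [hfq]]
          cases hfil : (rs'.filter (fun p => p.2 == m')).map Prod.fst with
          | nil =>
            exfalso
            have hmem := PySem.List.min?_mem h
            obtain ⟨p, hp, hpm⟩ := List.mem_map.mp hmem
            have hpf : p ∈ rs'.filter (fun p => p.2 == m') := by
              simp [List.mem_filter, hp, hpm]
            have hpf2 : p.1 ∈ (rs'.filter (fun p => p.2 == m')).map Prod.fst := List.mem_map_of_mem hpf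
            simp [hfil] at hpf2
          | cons y ys => simp
        · have hmin : min q.2 m' = q.2 := by omega
          rw [hmin, if_pos hq, if_neg hm']
          simp
      · rw [if_neg hq, ih mc mr, h]
        dsimp only
        by_cases hm' : m' < mc
        · have hmin : min q.2 m' = m' := by omega
          rw [hmin, if_pos hm', if_pos hm']
          have hfq : (q.2 == m') = false := by simp; omega
          simp [hfq]
        · have hmin : ¬ (min q.2 m' < mc) := by omega
          rw [if_neg hmin, if_neg hm']

lemma pymin_eq_head (h : Int) (rest : List Int) (hle : ∀ y ∈ rest, h ≤ y) :
    PySem.List.min? (h :: rest) (fun y => y) = some h := by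
  rw [pymin_cons_char]
  cases hm : PySem.List.min? rest (fun y => y) with
  | none => rfl
  | some m =>
    have hmem := hle m (PySem.List.min?_mem hm)
    simp [min_eq_left hmem]

lemma final_combine (dd : List Int) (c : Int → Int) (hne : dd ≠ [])
    (hpair : dd.Pairwise (· ≤ ·)) (mc0 mr0 : Int)
    (hmc : ∀ k ∈ dd, c k < mc0) :
    (bestRun (mc0, mr0) (dd.map (fun k => (k, c k)))).2
      = (PySem.List.min?
          (((dd.map (fun k => (k, c k))).filter
              (fun p => p.2 == (PySem.List.min? ((dd.map (fun k => (k, c k))).map Prod.snd) (fun v => v)).getD 0)).map Prod.fst)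
          (fun k => k)).getD 0 := by
  have hsnd : ((dd.map (fun k => (k, c k))).map Prod.snd) = dd.map c := by
    simp [List.map_map]
  rw [hsnd]
  cases hm : PySem.List.min? (dd.map c) (fun v => v) with
  | none =>
    exfalso
    cases dd with
    | nil => exact hne rfl
    | cons d0 dd' => rw [List.map_cons, pymin_cons_char] at hm; exact absurd hm (by simp)
  | some m =>
    have hmmem : m ∈ dd.map c := PySem.List.min?_mem hm
    obtain ⟨k0, hk0, hk0m⟩ := List.mem_map.mp hmmem
    have hmlt : m < mc0 := hk0m ▸ hmc k0 hk0
    rw [bestRun_char, hsnd, hm]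
    dsimp only
    rw [if_pos hmlt]
    have hgd : (some m).getD (0 : Int) = m := rfl
    rw [hgd]
    have hclne : k0 ∈ ((dd.map (fun k => (k, c k))).filter (fun p => p.2 == m)).map Prod.fst := by
      have h1 : (k0, c k0) ∈ dd.map (fun k => (k, c k)) := List.mem_map_of_mem hk0
      have h2 : (k0, c k0) ∈ (dd.map (fun k => (k, c k))).filter (fun p => p.2 == m) := by
        simp only [List.mem_filter]
        exact ⟨h1, by simp [hk0m]⟩
      exact List.mem_map_of_mem h2
    have hclp : (((dd.map (fun k => (k, c k))).filter (fun p => p.2 == m)).map Prod.fst).Pairwise (· ≤ ·) := by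
      rw [List.pairwise_map]
      refine List.Pairwise.filter _ ?_
      rw [List.pairwise_map]
      exact hpair
    cases hcl : ((dd.map (fun k => (k, c k))).filter (fun p => p.2 == m)).map Prod.fst with
    | nil => rw [hcl] at hclne; simp at hclne
    | cons ch crest =>
      rw [hcl] at hclp
      rw [pymin_eq_head ch crest (fun y hy => (List.pairwise_cons.mp hclp).1 y hy)]
      rfl

theorem major_and_minor_elem_spec : Claim_equal_major_and_minor_elem := by
  intro inp _ hpre
  unfold Pre_major_and_minor_elem at hpre
  obtain ⟨hlen3, hodd⟩ := hpre
  unfold Spec_major_and_minor_elem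
  simp only [major_and_minor_elem, major_and_minor_elem_alt]
  have hs_len : (PySem.List.sorted inp (fun x => x) false).length = inp.length :=
    PySem.List.length_sorted inp (fun x => x) false
  have hspair : (PySem.List.sorted inp (fun x => x) false).Pairwise (· ≤ ·) :=
    PySem.List.sorted_pairwise inp (fun x => x)
  generalize hgen : PySem.List.sorted inp (fun x => x) false = s at hs_len hspair ⊢
  obtain ⟨s0, t, hst⟩ : ∃ s0 t, s = s0 :: t := by
    cases hc : s with
    | nil => rw [hc] at hs_len; simp at hs_len; omega
    | cons a b => exact ⟨a, b, rfl⟩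
  subst hst
  have hmod : PySem.Int.mod (((s0 :: t).length : Int)) 2 = 1 := by
    rw [PySem.Int.mod_eq_emod_of_pos (by norm_num)]
    omega
  rw [if_neg (by rw [hmod]; norm_num)]
  have hidx : -(PySem.Int.floordiv (-((s0 :: t).length : Int)) 2)
      = PySem.Int.floordiv (((s0 :: t).length : Int) + 1) 2 := by
    rw [PySem.Int.floordiv_eq_ediv_of_pos (by norm_num),
        PySem.Int.floordiv_eq_ediv_of_pos (by norm_num)]
    omega
  -- A's loop = scanRun over the tail
  have hfold : (PySem.List.pyRange 1 (((s0 :: t).length : Int)) 1).foldl (pvStepA (s0 :: t))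
        ((((s0 :: t).length : Int)) + 1, 1, 0) = scanRun s0 ((((s0 :: t).length : Int)) + 1, 1, 0) t := by
    refine foldA_eq_scanRun (s0 :: t) t 1 _ s0 (by norm_num) ?_
    simp
  -- the element A reads in its final `if` is the last element of the sorted list
  have hlastD : t.getLastD s0 = PySem.List.pyGetD (s0 :: t) ((((s0 :: t).length : Int)) - 1) 0 := by
    rw [PySem.List.pyGetD_eq_getElem _ 0 (by omega) (by omega)]
    have hidx2 : ((((s0 :: t).length : Int)) - 1).toNat = (s0 :: t).length - 1 := by omega
    simp only [hidx2]
    rw [← List.getLast_eq_getLastD (l := t) (a := s0), List.getLast_eq_getElem]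
    exact List.cons_ne_nil s0 t
  -- A's minor = fold over runs
  have hminorA : (if (scanRun s0 ((((s0 :: t).length : Int)) + 1, 1, 0) t).2.1 < (scanRun s0 ((((s0 :: t).length : Int)) + 1, 1, 0) t).1
        then PySem.List.pyGetD (s0 :: t) ((((s0 :: t).length : Int)) - 1) 0
        else (scanRun s0 ((((s0 :: t).length : Int)) + 1, 1, 0) t).2.2)
      = (bestRun ((((s0 :: t).length : Int)) + 1, 0) (runsAux s0 1 t)).2 := by
    rw [← scanRun_best t s0 ((((s0 :: t).length : Int)) + 1) 1 0 _ hlastD]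
    split <;> rfl
  -- runs of the sorted list = distinct values with their multiplicities
  have hruns : runsAux s0 1 t
      = (PySem.Set.ofList (s0 :: t)).map (fun k => (k, ((List.count k (s0 :: t) : Nat) : Int))) := by
    rw [runsAux_eq_map t s0 1 hspair]
    apply List.map_congr_left
    intro k _
    by_cases hks : k = s0
    · subst hks
      simp
      omega
    · have hsk : ¬s0 = k := fun h => hks h.symm
      simp [hks, hsk]
  -- B's dictionary is Counter(s)
  have hcounter : (s0 :: t).foldl (fun (d : PySem.Dict Int Int) x => d.insert x (d.getD x 0 + 1)) PySem.Dict.empty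
      = PySem.Dict.counter (s0 :: t) := PySem.Dict.foldl_insert_getD_add_one_eq_counter (s0 :: t)
  have hitems : (PySem.Dict.counter (s0 :: t)).items
      = (PySem.Set.ofList (s0 :: t)).map (fun k => (k, ((List.count k (s0 :: t) : Nat) : Int))) :=
    PySem.Dict.items_counter (s0 :: t)
  have hvalues : (PySem.Dict.counter (s0 :: t)).values
      = ((PySem.Set.ofList (s0 :: t)).map (fun k => (k, ((List.count k (s0 :: t) : Nat) : Int)))).map Prod.snd := by
    rw [PySem.Dict.values, hitems]
  -- facts for final_combine
  have hddne : PySem.Set.ofList (s0 :: t) ≠ [] := by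
    have : s0 ∈ PySem.Set.ofList (s0 :: t) := (PySem.Set.mem_ofList _ s0).mpr (by simp)
    exact List.ne_nil_of_mem this
  have hddpair : (PySem.Set.ofList (s0 :: t)).Pairwise (· ≤ ·) :=
    List.Pairwise.sublist (ofList_sublist (s0 :: t)) hspair
  have hcnt : ∀ k ∈ PySem.Set.ofList (s0 :: t),
      ((List.count k (s0 :: t) : Nat) : Int) < (((s0 :: t).length : Int)) + 1 := by
    intro k _
    have := List.count_le_length (a := k) (l := s0 :: t)
    omega
  have hfinal := final_combine (PySem.Set.ofList (s0 :: t))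
      (fun k => ((List.count k (s0 :: t) : Nat) : Int))
      hddne hddpair ((((s0 :: t).length : Int)) + 1) 0 hcnt
  rw [hfold, hidx, hcounter, hitems, hvalues, hminorA, hruns, hfinal]
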